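-- pv_equiv track=rewrite | github.com/bmmeijers/pysfc | src/pysfc/pysfc.py | _transpose_bits
-- ===== SOURCE A (Python) =====
-- def _transpose_bits(srcs, nDests):
--     srcs = list(srcs)                   # Make a copy we can modify safely.
--     nSrcs = len(srcs)
--     dests = [0] * nDests
--     for j in range(nDests - 1, -1, -1): # (to first deal with y, then with x)
--         dest = 0
--         for k in range(nSrcs):
--             dest = dest * 2 + srcs[k] % 2
--             srcs[k] //= 2 # divide by two, i.e. shift right (>>) with 1
--         dests[j] = dest
--     return tuple(dests)
-- ===== SOURCE B (Python) =====
-- def _transpose_bits(srcs, nDests):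
--     # Scatter bits positionally: outer loop over sources, inner over destinations;
--     # no mutable copy of srcs and no Horner accumulation.
--     nSrcs = len(srcs)
--     dests = [0] * nDests
--     for k in range(nSrcs):
--         x = srcs[k]
--         weight = 1 << (nSrcs - 1 - k)
--         for j in range(nDests):
--             if (x >> (nDests - 1 - j)) & 1:
--                 dests[j] += weight
--     return tuple(dests)
-- ===== Notes on version B (the rewrite author's own statement) =====
-- stated objective: alternative
-- what changed: Replaces the mutable right-shifting copy of srcs and Horner multiply-accumulate (destination-major loop) with a source-major scatter: dests is preallocated and each source bit is extracted directly with >> and added at its positional weight 2^(nSrcs-1-k), so srcs is never mutated.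
import Mathlib
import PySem

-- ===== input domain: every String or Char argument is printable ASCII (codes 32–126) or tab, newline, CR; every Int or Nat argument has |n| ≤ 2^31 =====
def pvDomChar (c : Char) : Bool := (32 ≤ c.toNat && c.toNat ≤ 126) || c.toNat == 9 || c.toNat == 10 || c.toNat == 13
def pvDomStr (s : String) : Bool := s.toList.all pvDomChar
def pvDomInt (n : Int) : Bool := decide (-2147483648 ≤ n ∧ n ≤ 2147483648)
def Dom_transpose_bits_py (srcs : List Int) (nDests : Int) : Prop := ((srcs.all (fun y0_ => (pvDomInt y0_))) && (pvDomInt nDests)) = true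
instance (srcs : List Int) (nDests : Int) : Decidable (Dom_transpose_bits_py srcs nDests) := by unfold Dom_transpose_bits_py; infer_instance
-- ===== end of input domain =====

-- B replaces A's mutable right-shifting copy of srcs and Horner accumulation (destination-major)
-- with a source-major scatter that adds each bit at its positional weight; same cost, srcs untouched.


-- ===== PORT A =====
-- inner loop 'for k in range(nSrcs): dest = dest*2 + srcs[k] % 2; srcs[k] //= 2'
-- rendered as one sequential pass returning (dest, updated srcs)
def pvInnerA : List Int → Int → Int × List Int
  | [], dest => (dest, [])
  | x :: xs, dest =>
    let dest' := dest * 2 + PySem.Int.mod x 2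
    let r := pvInnerA xs dest'
    (r.1, PySem.Int.floordiv x 2 :: r.2)

-- outer loop over j in range(nDests-1, -1, -1); 'dests[j] = dest' (j always in range)
def pvOuterA : List Int → List Int → List Int → List Int
  | [], _, dests => dests
  | j :: js, srcs, dests =>
    let r := pvInnerA srcs 0
    pvOuterA js r.2 (dests.set j.toNat r.1)

def transpose_bits_py (srcs : List Int) (nDests : Int) : List Int :=
  pvOuterA (PySem.List.pyRange (nDests - 1) (-1) (-1)) srcs (List.replicate nDests.toNat 0)

-- ===== PORT B =====
-- '(x >> i) & 1' for i = nDests-1-j ≥ 0 is exactly '(x / 2^i) % 2' (Lean ediv/emod = Python's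
-- floor division / mod for the positive divisor 2^i); '1 << (nSrcs-1-k)' is 2^(nSrcs-1-k).
def transpose_bits_py_alt (srcs : List Int) (nDests : Int) : List Int :=
  let n := srcs.length
  (List.range n).foldl
    (fun ds k =>
      let x := srcs.getD k 0
      let w : Int := 2 ^ (n - 1 - k)
      (List.range nDests.toNat).foldl
        (fun ds' j => if (x / 2 ^ (nDests.toNat - 1 - j)) % 2 = 1
          then ds'.set j (ds'.getD j 0 + w) else ds') ds)
    (List.replicate nDests.toNat 0)

-- ===== PRECONDITION & SPEC =====
def Spec_transpose_bits_py (srcs : List Int) (nDests : Int) (out : List Int) : Prop := out = transpose_bits_py_alt srcs nDests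
instance (srcs : List Int) (nDests : Int) (out : List Int) : Decidable (Spec_transpose_bits_py srcs nDests out) := by unfold Spec_transpose_bits_py; infer_instance

-- ===== CLAIM (what is proved, stated in full; the proofs are below) =====
def Claim_equal_transpose_bits_py : Prop := ∀ (srcs : List Int) (nDests : Int), Dom_transpose_bits_py srcs nDests → Spec_transpose_bits_py srcs nDests (transpose_bits_py srcs nDests)

-- ===== LEMMAS AND PROOFS =====

-- the Horner value of the low bits, in sum form
def pvS : List Int → Int
  | [] => 0
  | x :: xs => (x % 2) * 2 ^ xs.length + pvS xs

-- value produced by A's j-th outer iteration: low bits of srcs each shifted right m times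
def pvVal (s : List Int) (m : Nat) : Int := pvS (s.map (fun x => x / 2 ^ m))

-- descending index list [t-1, …, 0]
def pvDesc : Nat → List Int
  | 0 => []
  | t + 1 => (t : Int) :: pvDesc t

theorem pvInnerA_eq (xs : List Int) (d : Int) :
    pvInnerA xs d = (xs.foldl (fun a x => a * 2 + x % 2) d, xs.map (fun x => x / 2)) := by
  induction xs generalizing d with
  | nil => rfl
  | cons x xs ih =>
    simp [pvInnerA, ih]

theorem pvHorner_eq (xs : List Int) (d : Int) :
    xs.foldl (fun a x => a * 2 + x % 2) d = d * 2 ^ xs.length + pvS xs := by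
  induction xs generalizing d with
  | nil => simp [pvS]
  | cons x xs ih =>
    simp only [List.foldl_cons, ih, pvS, List.length_cons, pow_succ]
    ring

theorem pvVal_half (s : List Int) (m : Nat) :
    pvVal (s.map (fun x => x / 2)) m = pvVal s (m + 1) := by
  unfold pvVal
  rw [List.map_map]
  congr 1
  refine List.map_congr_left (fun x _ => ?_)
  simp only [Function.comp]
  rw [Int.ediv_ediv_of_nonneg (by norm_num : (0:Int) ≤ 2)]
  congr 1
  rw [pow_succ]; ring

theorem pvDesc_eq (t : Nat) :
    (List.range t).map (fun k : Nat => (t : Int) - 1 - (k : Int)) = pvDesc t := by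
  induction t with
  | zero => rfl
  | succ t ih =>
    rw [List.range_succ_eq_map, List.map_cons, List.map_map, pvDesc]
    congr 1
    · push_cast; ring
    · rw [← ih]
      refine List.map_congr_left (fun k _ => ?_)
      simp only [Function.comp_apply]
      push_cast; ring

theorem pvDrop_set (l : List Int) (t : Nat) (v : Int) (h : t < l.length) :
    (l.set t v).drop t = v :: l.drop (t + 1) := by
  rw [List.drop_eq_getElem_cons (by simpa using h)]
  rw [List.getElem_set_self, List.drop_set_of_lt (by omega)]

theorem pvOuterA_desc (t : Nat) (s dests : List Int) (h : t ≤ dests.length) :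
    pvOuterA (pvDesc t) s dests
      = (List.range t).map (fun j => pvVal s (t - 1 - j)) ++ dests.drop t := by
  induction t generalizing s dests with
  | zero => simp [pvDesc, pvOuterA]
  | succ t ih =>
    have ht : t < dests.length := h
    rw [pvDesc]
    rw [show pvOuterA (((t : Nat) : Int) :: pvDesc t) s dests
        = pvOuterA (pvDesc t) (pvInnerA s 0).2
            (dests.set (((t : Nat) : Int)).toNat (pvInnerA s 0).1) from rfl]
    simp only [pvInnerA_eq, Int.toNat_natCast, pvHorner_eq, zero_mul, zero_add]
    rw [ih (s.map (fun x => x / 2)) _ (by simpa using le_of_lt ht)]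
    rw [pvDrop_set _ _ _ ht]
    rw [List.range_succ, List.map_append]
    have hmap : (List.range t).map (fun j => pvVal (s.map fun x => x / 2) (t - 1 - j))
        = (List.range t).map (fun j => pvVal s (t + 1 - 1 - j)) := by
      refine List.map_congr_left (fun j hj => ?_)
      rw [List.mem_range] at hj
      rw [pvVal_half]
      congr 1; omega
    rw [hmap]
    have hlast : pvVal s 0 = pvS s := by
      unfold pvVal
      congr 1
      refine (List.map_congr_left (fun x _ => by simp)).trans (List.map_id _)
    simp [hlast]

-- B's inner scatter pass, characterised positionally (g j is the 0/1 bit at position j)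
theorem pvScatter_eq (t : Nat) (g : Nat → Int) (w : Int) (ds : List Int)
    (h : t ≤ ds.length) (hg : ∀ j, g j = 0 ∨ g j = 1) :
    (List.range t).foldl
      (fun ds' j => if g j = 1 then ds'.set j (ds'.getD j 0 + w) else ds') ds
      = (List.range t).map (fun j => ds.getD j 0 + g j * w) ++ ds.drop t := by
  induction t with
  | zero => simp
  | succ t ih =>
    rw [List.range_succ, List.foldl_append, ih (by omega)]
    simp only [List.foldl_cons, List.foldl_nil]
    have hmlen : ((List.range t).map (fun j => ds.getD j 0 + g j * w)).length = t := by simp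
    have hget : ((List.range t).map (fun j => ds.getD j 0 + g j * w) ++ ds.drop t).getD t 0
        = ds.getD t 0 := by
      rw [List.getD_append_right _ _ _ _ (by omega)]
      rw [hmlen, Nat.sub_self]
      rw [List.drop_eq_getElem_cons (by omega)]
      simp [List.getD, List.getElem?_eq_getElem (by omega : t < ds.length)]
    have hdrop : (ds.drop t) = ds.getD t 0 :: ds.drop (t + 1) := by
      rw [List.drop_eq_getElem_cons (h := by omega)]
      simp [List.getD, List.getElem?_eq_getElem (by omega : t < ds.length)]
    rw [List.map_append]
    rcases hg t with h0 | h1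
    · rw [if_neg (by rw [h0]; norm_num)]
      rw [hdrop]
      simp [h0]
    · rw [if_pos h1, hget]
      rw [List.set_append_right _ _ (by omega), hmlen, Nat.sub_self]
      rw [hdrop, List.set_cons_zero]
      simp [h1]

theorem pvOuterB_eq (K D : Nat) (s : List Int) (hK : K ≤ s.length) :
    (List.range K).foldl
      (fun ds k =>
        (List.range D).foldl
          (fun ds' j => if ((s.getD k 0) / 2 ^ (D - 1 - j)) % 2 = 1
            then ds'.set j (ds'.getD j 0 + 2 ^ (s.length - 1 - k)) else ds') ds)
      (List.replicate D 0)
      = (List.range D).map (fun j =>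
          ((List.range K).map (fun k =>
            (((s.getD k 0) / 2 ^ (D - 1 - j)) % 2) * 2 ^ (s.length - 1 - k))).sum) := by
  induction K with
  | zero =>
    simp [List.map_const']
  | succ K ih =>
    rw [List.range_succ, List.foldl_append, ih (by omega)]
    simp only [List.foldl_cons, List.foldl_nil]
    have hlen : ((List.range D).map (fun j =>
        ((List.range K).map (fun k =>
          (((s.getD k 0) / 2 ^ (D - 1 - j)) % 2) * 2 ^ (s.length - 1 - k))).sum)).length = D := by
      simp
    rw [pvScatter_eq _ _ _ _ (by omega) (fun j => Int.emod_two_eq_zero_or_one _)]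
    rw [List.drop_eq_nil_of_le (le_of_eq hlen), List.append_nil]
    refine List.map_congr_left (fun j hj => ?_)
    rw [List.mem_range] at hj
    rw [List.getD_eq_getElem _ _ (by simpa using hj)]
    simp

-- pvS in indexed-sum form
theorem pvS_eq_sum (xs : List Int) :
    pvS xs = ((List.range xs.length).map
      (fun k => (xs.getD k 0 % 2) * 2 ^ (xs.length - 1 - k))).sum := by
  induction xs with
  | nil => simp [pvS]
  | cons x xs ih =>
    rw [pvS, ih]
    rw [List.length_cons, List.range_succ_eq_map, List.map_cons, List.map_map, List.sum_cons]
    congr 1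
    refine (congrArg List.sum (List.map_congr_left (fun k hk => ?_))).symm
    rw [List.mem_range] at hk
    simp only [Function.comp_apply, List.getD, List.getElem?_cons_succ]
    congr 2
    omega

theorem pvVal_eq_sum (s : List Int) (m : Nat) :
    pvVal s m = ((List.range s.length).map
      (fun k => (((s.getD k 0) / 2 ^ m) % 2) * 2 ^ (s.length - 1 - k))).sum := by
  unfold pvVal
  rw [pvS_eq_sum]
  simp only [List.length_map]
  refine congrArg List.sum (List.map_congr_left (fun k hk => ?_))
  rw [List.mem_range] at hk
  rw [List.getD_eq_getElem _ _ (by simpa using hk), List.getElem_map,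
    List.getD_eq_getElem _ _ hk]

theorem pvPyRange_desc (nDests : Int) :
    PySem.List.pyRange (nDests - 1) (-1) (-1) = pvDesc nDests.toNat := by
  rw [PySem.List.pyRange_neg_one]
  rw [← pvDesc_eq]
  have h : (nDests - 1 - -1).toNat = nDests.toNat := by omega
  rw [h]
  refine List.map_congr_left (fun k hk => ?_)
  rw [List.mem_range] at hk
  omega

-- ===== VERDICT (by name: the statement is the Claim_ definition above) =====
theorem transpose_bits_py_spec : Claim_equal_transpose_bits_py := by
  intro srcs nDests _
  show transpose_bits_py srcs nDests = transpose_bits_py_alt srcs nDests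
  unfold transpose_bits_py transpose_bits_py_alt
  rw [pvPyRange_desc]
  rw [pvOuterA_desc _ _ _ (by simp)]
  rw [List.drop_eq_nil_of_le (by simp), List.append_nil]
  rw [pvOuterB_eq _ _ _ (le_refl _)]
  refine List.map_congr_left (fun j hj => ?_)
  rw [pvVal_eq_sum]
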